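-- pv_equiv track=rewrite | github.com/JadeGate/jadegate | jade_core/security.py | _domain_matches_whitelist
-- ===== SOURCE A (Python) =====
-- from typing import Any, Dict, List, Set
--
-- def _domain_matches_whitelist(domain: str, whitelist: Set[str]) -> bool:
--     """Check if a domain matches any entry in the whitelist."""
--     for allowed in whitelist:
--         if allowed == "*":
--             return True
--         if domain == allowed:
--             return True
--         # Support wildcard subdomains: *.example.com
--         if allowed.startswith("*.") and domain.endswith(allowed[1:]):
--             return True
--     return False
-- ===== SOURCE B (Python) =====
-- def _domain_matches_whitelist(domain: str, whitelist) -> bool: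
--     """Check if a domain matches any entry in the whitelist.
--
--     Inverted search: build a set of the whitelist and test the candidate
--     patterns derived from the domain ("*", the domain itself, and
--     "*" + each dot-suffix of the domain) for membership."""
--     wl = set(whitelist)
--     if "*" in wl or domain in wl:
--         return True
--     return any(ch == "." and "*" + domain[i:] in wl
--                for i, ch in enumerate(domain))
-- ===== Notes on version B (the rewrite author's own statement) =====
-- stated objective: alternative
-- what changed: B inverts the search: instead of scanning every whitelist entry and running startswith/endswith per entry, it builds a set of the whitelist and tests the candidate patterns derived from the domain ("*", the domain itself, and "*"+each dot-suffix) for membership; it trades per-entry string tests for per-call set construction, so a single call is not measurably faster.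
import Mathlib
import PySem

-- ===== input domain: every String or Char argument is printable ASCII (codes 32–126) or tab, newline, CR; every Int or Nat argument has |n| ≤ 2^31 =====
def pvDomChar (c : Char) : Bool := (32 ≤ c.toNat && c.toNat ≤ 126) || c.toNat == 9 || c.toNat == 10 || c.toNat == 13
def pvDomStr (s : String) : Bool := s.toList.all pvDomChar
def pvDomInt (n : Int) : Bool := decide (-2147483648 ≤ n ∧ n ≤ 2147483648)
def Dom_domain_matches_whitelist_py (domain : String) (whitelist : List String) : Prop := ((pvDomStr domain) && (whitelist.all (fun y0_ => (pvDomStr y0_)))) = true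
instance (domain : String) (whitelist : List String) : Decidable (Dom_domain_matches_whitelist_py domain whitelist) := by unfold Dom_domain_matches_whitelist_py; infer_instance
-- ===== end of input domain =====

-- B inverts the search: it builds a set of the whitelist and tests the candidate patterns
-- derived from the domain for membership, instead of scanning every whitelist entry.

-- ===== PORT A =====
-- literal transliteration of A's for-loop with early returns
def domain_matches_whitelist_py (domain : String) (whitelist : List String) : Bool :=
  match whitelist with
  | [] => false
  | allowed :: rest =>
    if allowed == "*" then true
    else if domain == allowed then true
    else if PySem.Chars.startswith allowed.toList ['*', '.'] &&
            PySem.Chars.endswith domain.toList (PySem.List.slice allowed.toList (some 1) none)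
    then true
    else domain_matches_whitelist_py domain rest

-- ===== PORT B =====
-- the 'any(... for i, ch in enumerate(domain))' generator: scan domain's suffixes
def pvAltScan (d : List Char) (wl : PySem.Set String) : Bool :=
  match d with
  | [] => false
  | c :: rest => (c == '.' && PySem.Set.contains wl (String.ofList ('*' :: c :: rest))) || pvAltScan rest wl

def domain_matches_whitelist_py_alt (domain : String) (whitelist : List String) : Bool :=
  let wl := PySem.Set.ofList whitelist
  if PySem.Set.contains wl "*" || PySem.Set.contains wl domain then true
  else pvAltScan domain.toList wl

-- ===== PRECONDITION & SPEC =====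
def Spec_domain_matches_whitelist_py (domain : String) (whitelist : List String) (out : Bool) : Prop := out = domain_matches_whitelist_py_alt domain whitelist
instance (domain : String) (whitelist : List String) (out : Bool) : Decidable (Spec_domain_matches_whitelist_py domain whitelist out) := by unfold Spec_domain_matches_whitelist_py; infer_instance

-- ===== CLAIM (what is proved, stated in full; the proofs are below) =====
def Claim_equal_domain_matches_whitelist_py : Prop := ∀ (domain : String) (whitelist : List String), Dom_domain_matches_whitelist_py domain whitelist → Spec_domain_matches_whitelist_py domain whitelist (domain_matches_whitelist_py domain whitelist)

-- ===== LEMMAS AND PROOFS =====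

-- A as an existential over the whitelist
lemma pvA_iff (domain : String) (wl : List String) :
    domain_matches_whitelist_py domain wl = true ↔
      ∃ a ∈ wl, a = "*" ∨ domain = a ∨
        (PySem.Chars.startswith a.toList ['*', '.'] = true ∧
         PySem.Chars.endswith domain.toList (PySem.List.slice a.toList (some 1) none) = true) := by
  induction wl with
  | nil => simp [domain_matches_whitelist_py]
  | cons a rest ih =>
    simp only [domain_matches_whitelist_py]
    constructor
    · intro h
      split_ifs at h with hb1 hb2 hb3
      · exact ⟨a, by simp, Or.inl (by simpa using hb1)⟩
      · exact ⟨a, by simp, Or.inr (Or.inl (by simpa using hb2))⟩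
      · exact ⟨a, by simp, Or.inr (Or.inr (by simpa using hb3))⟩
      · obtain ⟨x, hm, hp⟩ := ih.mp h
        exact ⟨x, List.mem_cons_of_mem _ hm, hp⟩
    · rintro ⟨x, hm, hp⟩
      rcases List.mem_cons.mp hm with rfl | hm'
      · rcases hp with h | h | ⟨hs, he⟩
        · simp [h]
        · simp [h]
        · simp [hs, he]
      · have hr := ih.mpr ⟨x, hm', hp⟩
        split_ifs <;> simp [hr]

-- the scan as an existential over dot-suffixes of the domain
lemma pvScan_iff (d : List Char) (wl : PySem.Set String) :
    pvAltScan d wl = true ↔ ∃ t, ('.' :: t) <:+ d ∧ PySem.Set.contains wl (String.ofList ('*' :: '.' :: t)) = true := by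
  induction d with
  | nil => simp [pvAltScan]
  | cons c rest ih =>
    simp only [pvAltScan, Bool.or_eq_true, Bool.and_eq_true, beq_iff_eq, ih]
    constructor
    · rintro (⟨rfl, hc⟩ | ⟨t, hs, hc⟩)
      · exact ⟨rest, List.suffix_refl _, hc⟩
      · exact ⟨t, hs.trans (List.suffix_cons _ _), hc⟩
    · rintro ⟨t, hs, hc⟩
      rcases List.suffix_cons_iff.mp hs with h | h
      · injection h with h1 h2
        subst h2; subst h1
        exact Or.inl ⟨rfl, hc⟩
      · exact Or.inr ⟨t, h, hc⟩

-- the wildcard test on an entry ≡ the entry is '*'+'.'+t for a dot-suffix t of the domain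
lemma pvWildcard_iff (domain a : String) :
    (PySem.Chars.startswith a.toList ['*', '.'] = true ∧
     PySem.Chars.endswith domain.toList (PySem.List.slice a.toList (some 1) none) = true) ↔
    ∃ t, a.toList = '*' :: '.' :: t ∧ ('.' :: t) <:+ domain.toList := by
  constructor
  · rintro ⟨hs, he⟩
    rw [PySem.Chars.startswith_iff] at hs
    obtain ⟨t, ht⟩ := hs
    refine ⟨t, by simpa using ht.symm, ?_⟩
    rw [PySem.Chars.endswith_iff] at he
    have : PySem.List.slice a.toList (some 1) none = '.' :: t := by
      rw [← ht]
      simpa using PySem.List.slice_from_natCast (['*', '.'] ++ t) 1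
    rwa [this] at he
  · rintro ⟨t, ha, hsuf⟩
    constructor
    · rw [PySem.Chars.startswith_iff, ha]; exact ⟨t, rfl⟩
    · rw [PySem.Chars.endswith_iff, ha]
      have : PySem.List.slice ('*' :: '.' :: t) (some 1) none = '.' :: t := by
        simpa using PySem.List.slice_from_natCast ('*' :: '.' :: t) 1
      rw [this]; exact hsuf

lemma pvB_iff (domain : String) (wl : List String) :
    domain_matches_whitelist_py_alt domain wl = true ↔
      "*" ∈ wl ∨ domain ∈ wl ∨
        ∃ t, ('.' :: t) <:+ domain.toList ∧ String.ofList ('*' :: '.' :: t) ∈ wl := by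
  simp only [domain_matches_whitelist_py_alt]
  by_cases h1 : "*" ∈ wl
  · simp [h1]
  by_cases h2 : domain ∈ wl
  · simp [h2]
  · simp [pvScan_iff, h1, h2]

-- ===== VERDICT (by name: the statement is the Claim_ definition above) =====
theorem domain_matches_whitelist_py_spec : Claim_equal_domain_matches_whitelist_py := by
  intro domain wl _
  unfold Spec_domain_matches_whitelist_py
  rw [Bool.eq_iff_iff, pvA_iff, pvB_iff]
  constructor
  · rintro ⟨a, hm, rfl | rfl | hp⟩
    · exact Or.inl hm
    · exact Or.inr (Or.inl hm)
    · obtain ⟨t, ha, hsuf⟩ := (pvWildcard_iff domain a).mp hp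
      refine Or.inr (Or.inr ⟨t, hsuf, ?_⟩)
      have hx : String.ofList ('*' :: '.' :: t) = a := by
        rw [← ha]; exact String.ofList_toList
      rwa [hx]
  · rintro (h | h | ⟨t, hsuf, hm⟩)
    · exact ⟨"*", h, Or.inl rfl⟩
    · exact ⟨domain, h, Or.inr (Or.inl rfl)⟩
    · exact ⟨String.ofList ('*' :: '.' :: t), hm, Or.inr (Or.inr
        ((pvWildcard_iff domain _).mpr ⟨t, by simp, hsuf⟩))⟩
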